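-- pv_equiv track=rewrite | github.com/MGaulia/AdventOfCode2024 | 9.py | joinnums
-- ===== SOURCE A (Python) =====
-- dotset = set(".")
--
-- def joinnums(temp):
--     newtemp = []
--     tempdots = ""
--     for t in temp:
--         if set(t) == dotset:
--             tempdots += t
--         else:
--             if len(tempdots) > 0:
--                 newtemp.append(tempdots)
--                 tempdots = ""
--             newtemp.append(t)
--     if len(tempdots) > 0:
--         newtemp.append(tempdots)
--
--     return newtemp
-- ===== SOURCE B (Python) =====
-- dotset = set(".")
--
--
-- def joinnums(temp):
--     # Run-based rewrite: scan maximal runs of dot-strings and join each run at once,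
--     # instead of threading a tempdots accumulator through a flat loop.
--     out = []
--     i = 0
--     n = len(temp)
--     while i < n:
--         if set(temp[i]) == dotset:
--             j = i
--             while j < n and set(temp[j]) == dotset:
--                 j += 1
--             out.append("".join(temp[i:j]))
--             i = j
--         else:
--             out.append(temp[i])
--             i += 1
--     return out
-- ===== Notes on version B (the rewrite author's own statement) =====
-- stated objective: alternative
-- what changed: B partitions the list into maximal runs of all-dot strings and joins each run in one step, instead of A's flat loop threading a tempdots string accumulator with flush-on-non-dot logic.
import Mathlib
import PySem

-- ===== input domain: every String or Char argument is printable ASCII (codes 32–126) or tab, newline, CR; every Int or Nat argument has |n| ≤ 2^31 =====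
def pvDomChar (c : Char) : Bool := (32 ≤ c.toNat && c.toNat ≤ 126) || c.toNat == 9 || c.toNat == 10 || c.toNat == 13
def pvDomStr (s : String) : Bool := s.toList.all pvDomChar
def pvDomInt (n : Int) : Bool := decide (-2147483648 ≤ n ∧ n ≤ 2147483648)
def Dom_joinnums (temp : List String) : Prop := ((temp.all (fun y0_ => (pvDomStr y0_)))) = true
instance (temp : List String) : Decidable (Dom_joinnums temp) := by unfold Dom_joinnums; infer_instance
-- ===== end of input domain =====

-- B merges consecutive all-dot strings by scanning maximal runs and joining each run at once,
-- instead of A's flat loop with a tempdots accumulator (alternative decomposition, same cost).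


-- ===== PORT A =====
-- set(t) == dotset : exact via PySem.Set (dotset = set("."))
def pvIsDot (t : String) : Bool :=
  PySem.Set.equal (PySem.Set.ofList t.toList) (PySem.Set.ofList ['.'])

-- the for-loop of A, state = (newtemp, tempdots); tempdots kept as List Char (string concat
-- and len ported on the char-list side, as PySem prescribes)
def pvLoopA : List String → List String → List Char → List String
  | [], newtemp, tempdots =>
      if tempdots.length > 0 then newtemp ++ [String.ofList tempdots] else newtemp
  | t :: rest, newtemp, tempdots =>
      if pvIsDot t then
        pvLoopA rest newtemp (tempdots ++ t.toList)
      else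
        if tempdots.length > 0 then pvLoopA rest (newtemp ++ [String.ofList tempdots, t]) []
        else pvLoopA rest (newtemp ++ [t]) []

def joinnums (temp : List String) : List String := pvLoopA temp [] []

-- ===== PORT B =====
-- run-based scan: take the maximal dot-run, join it, continue after it
def joinnums_alt : List String → List String
  | [] => []
  | t :: rest =>
      if pvIsDot t then
        PySem.Str.join "" (t :: rest.takeWhile pvIsDot) :: joinnums_alt (rest.dropWhile pvIsDot)
      else
        t :: joinnums_alt rest
termination_by temp => temp.length
decreasing_by
  · exact Nat.lt_succ_of_le (List.length_dropWhile_le pvIsDot rest)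
  · exact Nat.lt_succ_self _

-- ===== PRECONDITION & SPEC =====
def Spec_joinnums (temp : List String) (out : List String) : Prop := out = joinnums_alt temp
instance (temp : List String) (out : List String) : Decidable (Spec_joinnums temp out) := by unfold Spec_joinnums; infer_instance

-- ===== CLAIM (what is proved, stated in full; the proofs are below) =====
def Claim_equal_joinnums : Prop := ∀ (temp : List String), Dom_joinnums temp → Spec_joinnums temp (joinnums temp)

-- ===== LEMMAS AND PROOFS =====

-- a dot-string is nonempty (set('') = ∅ ≠ {'.'})
theorem pvIsDot_ne_nil {t : String} (h : pvIsDot t = true) : t.toList ≠ [] := by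
  intro hnil
  rw [pvIsDot, hnil] at h
  exact absurd h (by decide)

-- the accumulator lemma for A's loop
theorem pvLoopA_acc (temp : List String) :
    ∀ (acc : List String) (dots : List Char),
      pvLoopA temp acc dots = acc ++ pvLoopA temp [] dots := by
  induction temp with
  | nil => intro acc dots; simp only [pvLoopA]; split <;> simp
  | cons t rest ih =>
      intro acc dots
      by_cases h : pvIsDot t = true
      · simp only [pvLoopA, h, if_true]; exact ih acc _
      · simp only [pvLoopA, h, Bool.false_eq_true, if_false]
        split
        · rw [ih (acc ++ _), ih ([] ++ _)]; simp
        · rw [ih (acc ++ _), ih ([] ++ _)]; simp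

-- joining with empty separator is concatenation
theorem pvJoin_cons (x : List Char) (xs : List (List Char)) :
    PySem.Chars.join [] (x :: xs) = x ++ PySem.Chars.join [] xs := by
  cases xs <;> simp [PySem.Chars.join, List.intercalate, List.intersperse]

-- key invariant: A's loop with pending dots equals B's run-based output with the dots glued
-- onto the leading dot-run
def pvGlue (dots : List Char) (temp : List String) : List String :=
  if dots.length > 0 then
    String.ofList (dots ++ PySem.Chars.join [] ((temp.takeWhile pvIsDot).map String.toList))
      :: joinnums_alt (temp.dropWhile pvIsDot)
  else joinnums_alt temp

theorem pvGlue_nil (temp : List String) : pvGlue [] temp = joinnums_alt temp := by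
  rw [pvGlue]; simp

theorem pvLoopA_eq_glue (temp : List String) :
    ∀ (dots : List Char), pvLoopA temp [] dots = pvGlue dots temp := by
  induction temp with
  | nil =>
      intro dots
      simp only [pvLoopA, pvGlue, List.takeWhile_nil, List.dropWhile_nil, List.map_nil,
        PySem.Chars.join_nil, List.append_nil, joinnums_alt]
      split <;> rfl
  | cons t rest ih =>
      intro dots
      by_cases h : pvIsDot t = true
      · have hne := pvIsDot_ne_nil h
        rw [pvLoopA]
        simp only [h, if_true, ih]
        rw [pvGlue, pvGlue]
        have hpos : 0 < (dots ++ t.toList).length := by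
          rw [List.length_append]
          have : t.toList.length ≠ 0 := fun he => hne (List.eq_nil_of_length_eq_zero he)
          omega
        rw [if_pos hpos]
        rw [List.takeWhile_cons_of_pos h, List.dropWhile_cons_of_pos h, List.map_cons, pvJoin_cons]
        by_cases hd : 0 < dots.length
        · rw [if_pos hd]
          simp [List.append_assoc]
        · have hdn : dots = [] := List.eq_nil_of_length_eq_zero (by omega)
          rw [if_neg hd]
          subst hdn
          rw [joinnums_alt]
          simp only [h, if_true]
          simp [PySem.Str.join, pvJoin_cons]
      · rw [pvLoopA]
        simp only [h, Bool.false_eq_true, if_false]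
        have hshape : joinnums_alt (t :: rest) = t :: joinnums_alt rest := by
          rw [joinnums_alt]; simp [h]
        by_cases hd : 0 < dots.length
        · rw [if_pos hd, pvLoopA_acc, ih, pvGlue_nil, pvGlue, if_pos hd]
          rw [List.takeWhile_cons_of_neg (by simp [h]), List.dropWhile_cons_of_neg (by simp [h]),
            hshape]
          simp [PySem.Chars.join_nil]
        · have hdn : dots = [] := List.eq_nil_of_length_eq_zero (by omega)
          subst hdn
          rw [if_neg hd, pvLoopA_acc, ih, pvGlue_nil, pvGlue_nil, hshape]
          simp

theorem joinnums_spec' (temp : List String) : joinnums temp = joinnums_alt temp := by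
  rw [joinnums, pvLoopA_eq_glue, pvGlue_nil]

-- ===== VERDICT (by name: the statement is the Claim_ definition above) =====
theorem joinnums_spec : Claim_equal_joinnums := by
  intro temp _
  unfold Spec_joinnums
  exact joinnums_spec' temp
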